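-- pv_equiv track=rewrite | github.com/Ogulcan2005/Leren-programmeren | Challenges/assesments/Boodschap_in_boodschap.py | haal_tekst_tussenhaakjes
-- ===== SOURCE A (Python) =====
-- def haal_tekst_tussenhaakjes(text):
--     tussenhaakjes = ''
--     binnen_haakjes = False
--     for character in text:
--         if binnen_haakjes and character != ']':
--             tussenhaakjes += character
--         elif character == '[':
--             binnen_haakjes = True
--         elif character == ']':
--             binnen_haakjes = False
--     return tussenhaakjes
-- ===== SOURCE B (Python) =====
-- def haal_tekst_tussenhaakjes(text):
--     parts = []
--     i = 0
--     n = len(text)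
--     while True:
--         o = text.find('[', i)
--         if o == -1:
--             break
--         c = text.find(']', o + 1)
--         if c == -1:
--             parts.append(text[o + 1:])
--             break
--         parts.append(text[o + 1:c])
--         i = c + 1
--     return ''.join(parts)
-- ===== Notes on version B (the rewrite author's own statement) =====
-- stated objective: faster
-- what changed: Replaces the char-by-char boolean-flag loop with a cursor scan that uses str.find to jump to the next '[' and ']' and appends whole slices, joining once at the end.
import Mathlib
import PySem

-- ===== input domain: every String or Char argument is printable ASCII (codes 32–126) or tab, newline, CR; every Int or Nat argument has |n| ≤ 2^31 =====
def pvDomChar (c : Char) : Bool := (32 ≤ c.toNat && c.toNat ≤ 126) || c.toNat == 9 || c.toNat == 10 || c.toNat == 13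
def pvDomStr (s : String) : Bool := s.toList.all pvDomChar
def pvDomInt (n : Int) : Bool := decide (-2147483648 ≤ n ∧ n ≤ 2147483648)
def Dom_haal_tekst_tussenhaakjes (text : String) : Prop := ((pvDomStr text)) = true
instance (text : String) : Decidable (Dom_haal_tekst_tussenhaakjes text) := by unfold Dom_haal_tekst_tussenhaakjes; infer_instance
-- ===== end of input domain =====

-- B replaces the char-by-char flag loop with a find-and-slice cursor scan (fewer passes/allocations).
-- ===== PORT A =====
-- flag loop: accumulate chars while inside brackets ('[' opens, ']' closes)
def haal_tekst_tussenhaakjes (text : String) : String :=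
  String.mk (text.toList.foldl
    (fun (st : List Char × Bool) (character : Char) =>
      if st.2 ∧ character ≠ ']' then (st.1 ++ [character], st.2)
      else if character = '[' then (st.1, true)
      else if character = ']' then (st.1, false)
      else st)
    ([], false)).1

-- ===== PORT B =====
-- cursor scan: drop to the next '[' (find), take the slice up to the next ']' (find+slice),
-- continue after the ']'; an unclosed '[' takes the remainder.
def pvAltGo : List Char → List Char
  | [] => []
  | c :: rest =>
    if c = '[' then
      let content := rest.takeWhile (· ≠ ']')
      match h : rest.dropWhile (· ≠ ']') with
      | [] => content
      | _ :: tail => content ++ pvAltGo tail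
    else pvAltGo rest
termination_by cs => cs.length
decreasing_by
  · simp only [List.length_cons]
    have h1 : (rest.dropWhile (· ≠ ']')).length ≤ rest.length := List.length_dropWhile_le _ _
    rw [h] at h1; simp at h1; omega
  · simp

def haal_tekst_tussenhaakjes_alt (text : String) : String :=
  String.mk (pvAltGo text.toList)

-- ===== PRECONDITION & SPEC =====
def Spec_haal_tekst_tussenhaakjes (text : String) (out : String) : Prop := out = haal_tekst_tussenhaakjes_alt text
instance (text : String) (out : String) : Decidable (Spec_haal_tekst_tussenhaakjes text out) := by unfold Spec_haal_tekst_tussenhaakjes; infer_instance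

-- ===== CLAIM (what is proved, stated in full; the proofs are below) =====
def Claim_equal_haal_tekst_tussenhaakjes : Prop := ∀ (text : String), Dom_haal_tekst_tussenhaakjes text → Spec_haal_tekst_tussenhaakjes text (haal_tekst_tussenhaakjes text)

-- ===== LEMMAS AND PROOFS =====

def pvStepA (st : List Char × Bool) (character : Char) : List Char × Bool :=
  if st.2 ∧ character ≠ ']' then (st.1 ++ [character], st.2)
  else if character = '[' then (st.1, true)
  else if character = ']' then (st.1, false)
  else st

-- result of the "inside brackets" state, expressed via B's slices
def pvInside (cs : List Char) : List Char :=
  cs.takeWhile (· ≠ ']') ++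
    (match cs.dropWhile (· ≠ ']') with
     | [] => []
     | _ :: tail => pvAltGo tail)

theorem pvStepA_false_open (acc : List Char) : pvStepA (acc, false) '[' = (acc, true) := by
  simp [pvStepA]

theorem pvStepA_false_close (acc : List Char) : pvStepA (acc, false) ']' = (acc, false) := by
  simp [pvStepA]

theorem pvStepA_false_other (acc : List Char) (c : Char) (h1 : c ≠ '[') (h2 : c ≠ ']') :
    pvStepA (acc, false) c = (acc, false) := by
  simp [pvStepA, h1, h2]

theorem pvStepA_true_close (acc : List Char) : pvStepA (acc, true) ']' = (acc, false) := by
  simp [pvStepA]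

theorem pvStepA_true_other (acc : List Char) (c : Char) (h : c ≠ ']') :
    pvStepA (acc, true) c = (acc ++ [c], true) := by
  simp [pvStepA, h]

theorem pvAltGo_open (rest : List Char) : pvAltGo ('[' :: rest) = pvInside rest := by
  rw [pvAltGo, pvInside]
  cases h : rest.dropWhile (· ≠ ']')
  · simp [h]
  · simp

theorem pvAltGo_skip (c : Char) (rest : List Char) (h : c ≠ '[') :
    pvAltGo (c :: rest) = pvAltGo rest := by
  rw [pvAltGo]
  simp [h]

theorem pvFold_eq : ∀ (cs : List Char) (acc : List Char),
    (cs.foldl pvStepA (acc, false)).1 = acc ++ pvAltGo cs ∧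
    (cs.foldl pvStepA (acc, true)).1 = acc ++ pvInside cs := by
  intro cs
  induction cs with
  | nil => intro acc; simp [pvAltGo, pvInside]
  | cons c rest ih =>
    intro acc
    constructor
    · by_cases hc : c = '['
      · subst hc
        rw [List.foldl_cons, pvStepA_false_open, (ih acc).2, pvAltGo_open]
      · by_cases hc2 : c = ']'
        · subst hc2
          rw [List.foldl_cons, pvStepA_false_close, (ih acc).1,
            pvAltGo_skip _ _ (by decide)]
        · rw [List.foldl_cons, pvStepA_false_other _ _ hc hc2, (ih acc).1,
            pvAltGo_skip _ _ hc]
    · by_cases hc2 : c = ']'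
      · subst hc2
        rw [List.foldl_cons, pvStepA_true_close, (ih acc).1, pvInside]
        simp
      · rw [List.foldl_cons, pvStepA_true_other _ _ hc2, (ih (acc ++ [c])).2,
          pvInside, pvInside, List.takeWhile_cons_of_pos (by simpa using hc2),
          List.dropWhile_cons_of_pos (by simpa using hc2)]
        simp

-- ===== VERDICT (by name: the statement is the Claim_ definition above) =====
theorem haal_tekst_tussenhaakjes_spec : Claim_equal_haal_tekst_tussenhaakjes := by
  intro text _
  unfold Spec_haal_tekst_tussenhaakjes haal_tekst_tussenhaakjes haal_tekst_tussenhaakjes_alt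
  have h : text.toList.foldl (fun (st : List Char × Bool) (character : Char) =>
      if st.2 ∧ character ≠ ']' then (st.1 ++ [character], st.2)
      else if character = '[' then (st.1, true)
      else if character = ']' then (st.1, false)
      else st) ([], false) = text.toList.foldl pvStepA ([], false) := rfl
  rw [h, (pvFold_eq text.toList []).1]
  simp
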